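-- pv_equiv track=rewrite | github.com/pahanini/aoc | 2020/21.py | pzl1
-- ===== SOURCE A (Python) =====
-- from collections import defaultdict
--
-- def pzl1(food, ings, ales):
--     x = {i: ales.copy() for i in ings}
--     c = defaultdict(int)
--     for ii, aa in food:
--         for a in aa:
--             for i in ings:
--                 if i not in ii:
--                     x[i].discard(a)
--         for i in ii:
--             c[i] += 1
--     return sum([(c[i]) for i, a in x.items() if len(a) == 0]), x
-- ===== SOURCE B (Python) =====
-- def pzl1(food, ings, ales):
--     # per allergen: intersection of ingredient sets of foods listing it
--     cand = {}
--     for ii, aa in food: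
--         si = set(ii)
--         for a in aa:
--             cand[a] = cand[a] & si if a in cand else si
--     c = {}
--     for ii, _ in food:
--         for i in ii:
--             c[i] = c.get(i, 0) + 1
--     x = {i: {a for a in ales if a not in cand or i in cand[a]} for i in ings}
--     return sum(c.get(i, 0) for i in x if not x[i]), x
-- ===== Notes on version B (the rewrite author's own statement) =====
-- stated objective: faster
-- what changed: Instead of scanning every ingredient for every (food, allergen) pair and discarding from per-ingredient sets, B intersects the ingredient sets of foods per allergen once and then derives each ingredient's candidate-allergen set by a single filter over the allergen set.
import Mathlib
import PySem

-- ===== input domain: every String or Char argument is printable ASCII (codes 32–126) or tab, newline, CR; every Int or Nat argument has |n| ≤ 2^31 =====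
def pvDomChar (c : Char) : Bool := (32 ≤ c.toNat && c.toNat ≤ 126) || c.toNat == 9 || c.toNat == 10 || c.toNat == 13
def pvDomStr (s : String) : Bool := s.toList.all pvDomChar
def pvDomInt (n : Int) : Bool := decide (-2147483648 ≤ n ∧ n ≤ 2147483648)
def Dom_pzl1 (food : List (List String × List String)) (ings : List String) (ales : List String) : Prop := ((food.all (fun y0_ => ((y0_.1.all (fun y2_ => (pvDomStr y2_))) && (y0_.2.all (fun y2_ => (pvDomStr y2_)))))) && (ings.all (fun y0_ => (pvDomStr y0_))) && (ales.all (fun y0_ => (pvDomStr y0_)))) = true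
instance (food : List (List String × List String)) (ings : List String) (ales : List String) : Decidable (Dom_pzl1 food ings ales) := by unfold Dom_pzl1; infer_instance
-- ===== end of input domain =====

-- B replaces A's per-food scan over all ingredients (O(F·|aa|·|ings|·|ii|)) by per-allergen
-- intersections of ingredient sets, deriving each ingredient's candidate set by one filter. Objective: faster.


-- ===== PORT A =====
def pzl1 (food : List (List String × List String)) (ings : List String) (ales : List String) : Int × (List (String × List String)) :=
  -- x = {i: ales.copy() for i in ings}
  let x0 : PySem.Dict String (PySem.Set String) :=
    ings.foldl (fun d i => d.insert i (PySem.Set.ofList ales)) (PySem.Dict.mk [])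
  -- for ii, aa in food: (discard pass; counting pass)
  let xc :=
    food.foldl
      (fun (st : PySem.Dict String (PySem.Set String) × PySem.Dict String Int) f =>
        (f.2.foldl
            (fun x a =>
              ings.foldl
                (fun x i =>
                  if f.1.contains i then x
                  else x.modify i PySem.Set.empty (fun s => s.discard a))
                x)
            st.1,
         f.1.foldl (fun c i => c.modify i 0 (· + 1)) st.2))
      (x0, PySem.Dict.mk [])
  (((xc.1.items.filter (fun p => PySem.Set.len p.2 == 0)).map (fun p => xc.2.getD p.1 0)).sum,
   xc.1.items)

-- ===== PORT B =====
def pzl1_alt (food : List (List String × List String)) (ings : List String) (ales : List String) : Int × (List (String × List String)) :=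
  -- cand[a] = intersection of set(ii) over foods whose allergen list contains a
  let cand : PySem.Dict String (PySem.Set String) :=
    food.foldl
      (fun cand f =>
        let si := PySem.Set.ofList f.1
        f.2.foldl
          (fun cand a =>
            cand.insert a
              (match cand.get? a with
               | some s => PySem.Set.inter s si
               | none => si))
          cand)
      (PySem.Dict.mk [])
  -- c[i] = c.get(i, 0) + 1 over all ingredient occurrences
  let c : PySem.Dict String Int :=
    food.foldl (fun c f => f.1.foldl (fun c i => c.insert i (c.getD i 0 + 1)) c) (PySem.Dict.mk [])
  -- x = {i: {a for a in ales if a not in cand or i in cand[a]} for i in ings}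
  let x : PySem.Dict String (PySem.Set String) :=
    ings.foldl
      (fun d i =>
        d.insert i
          ((PySem.Set.ofList ales).filter (fun a =>
            match cand.get? a with
            | none => true
            | some s => s.contains i)))
      (PySem.Dict.mk [])
  (((x.items.filter (fun p => p.2.isEmpty)).map (fun p => c.getD p.1 0)).sum, x.items)

-- ===== PRECONDITION & SPEC =====
def Spec_pzl1 (food : List (List String × List String)) (ings : List String) (ales : List String) (out : Int × (List (String × List String))) : Prop := out = pzl1_alt food ings ales
instance (food : List (List String × List String)) (ings : List String) (ales : List String) (out : Int × (List (String × List String))) : Decidable (Spec_pzl1 food ings ales out) := by unfold Spec_pzl1; infer_instance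

-- ===== CLAIM (what is proved, stated in full; the proofs are below) =====
def Claim_equal_pzl1 : Prop := ∀ (food : List (List String × List String)) (ings : List String) (ales : List String), Dom_pzl1 food ings ales → Spec_pzl1 food ings ales (pzl1 food ings ales)

-- ===== LEMMAS AND PROOFS =====

def pvTag (m : List String) (g : String → PySem.Set String) : PySem.Dict String (PySem.Set String) :=
  PySem.Dict.mk (m.map (fun i => (i, g i)))

theorem pv_insert_tag (m : List String) (g : String → PySem.Set String) (k : String) :
    (pvTag m g).insert k (g k) = pvTag (PySem.Set.add m k) g := by
  simp only [pvTag, PySem.Dict.insert, PySem.Set.add, PySem.Dict.contains,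
    List.any_map, PySem.Set.contains]
  have hany : (m.any ((fun p => p.1 == k) ∘ fun i => (i, g i))) = m.contains k := by
    induction m with
    | nil => rfl
    | cons x xs ih => simp only [List.any_cons, List.contains_cons, ih, Function.comp]; rw [BEq.comm]
  rw [hany]
  by_cases h : m.contains k = true
  · simp only [h, if_true, List.map_map]
    congr 1
    apply List.map_congr_left
    intro j _
    by_cases hj : j = k
    · subst hj; simp [Function.comp]
    · simp [Function.comp, hj]
  · simp only [h, Bool.false_eq_true, if_false]
    simp [List.map_append]

theorem pv_foldl_insert_tag (g : String → PySem.Set String) :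
    ∀ (l m : List String),
      (l.foldl (fun d i => d.insert i (g i)) (pvTag m g)) = pvTag (PySem.Set.update m l) g := by
  intro l
  induction l with
  | nil => intro m; simp [PySem.Set.update]
  | cons i rest ih =>
    intro m
    rw [List.foldl_cons, pv_insert_tag, ih]
    rfl

theorem pvTag_congr {m : List String} {g g' : String → PySem.Set String}
    (h : ∀ i ∈ m, g i = g' i) : pvTag m g = pvTag m g' := by
  unfold pvTag
  congr 1
  apply List.map_congr_left
  intro j hj
  rw [h j hj]

theorem pv_modify_tag (m : List String) (g : String → PySem.Set String) (k : String)
    (hk : k ∈ m) (d0 : PySem.Set String) (f : PySem.Set String → PySem.Set String) :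
    (pvTag m g).modify k d0 f = pvTag m (fun i => if i = k then f (g i) else g i) := by
  have hget : (pvTag m g).get? k = some (g k) := by
    simp only [pvTag, PySem.Dict.get?]
    induction m with
    | nil => simp at hk
    | cons x xs ih =>
      by_cases hx : x = k
      · subst hx
        rw [List.map_cons, List.find?_cons_of_pos (by simp)]
        rfl
      · rw [List.map_cons, List.find?_cons_of_neg (by simp [hx])]
        exact ih ((List.mem_cons.mp hk).resolve_left (fun h => hx h.symm))
  have hcont : (pvTag m g).contains k = true := by
    simp only [pvTag, PySem.Dict.contains, List.any_map]
    exact List.any_eq_true.mpr ⟨k, hk, by simp [Function.comp]⟩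
  rw [PySem.Dict.modify, PySem.Dict.getD, hget, Option.getD_some, PySem.Dict.insert, if_pos hcont]
  simp only [pvTag, List.map_map]
  congr 1
  apply List.map_congr_left
  intro j _
  by_cases hj : j = k
  · subst hj; simp [Function.comp]
  · simp [Function.comp, hj]

theorem pv_discard_idem (s : PySem.Set String) (a : String) :
    PySem.Set.discard (PySem.Set.discard s a) a = PySem.Set.discard s a := by
  simp only [PySem.Set.discard, List.filter_filter]
  apply List.filter_congr
  intro y _
  cases h : y == a <;> simp

theorem pv_ingsfold_tag (ii : List String) (a : String) :
    ∀ (l : List String) (m : List String) (g : String → PySem.Set String),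
      (∀ i ∈ l, i ∈ m) →
      (l.foldl
        (fun x i => if ii.contains i then x else x.modify i PySem.Set.empty (fun s => s.discard a))
        (pvTag m g))
      = pvTag m (fun i => if i ∈ l ∧ ii.contains i = false then (g i).discard a else g i) := by
  intro l
  induction l with
  | nil =>
    intro m g _
    rw [List.foldl_nil]
    apply pvTag_congr
    intro j _
    simp
  | cons i rest ih =>
    intro m g hsub
    rw [List.foldl_cons]
    by_cases hc : ii.contains i = true
    · rw [if_pos hc, ih m g (fun j hj => hsub j (List.mem_cons_of_mem _ hj))]
      apply pvTag_congr
      intro j _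
      by_cases hji : j = i
      · subst hji
        simp only [hc]
        by_cases hjr : j ∈ rest <;> simp [hjr]
      · simp [List.mem_cons, hji]
    · rw [if_neg hc, pv_modify_tag m g i (hsub i List.mem_cons_self) _ _,
        ih m _ (fun j hj => hsub j (List.mem_cons_of_mem _ hj))]
      apply pvTag_congr
      intro j _
      by_cases hji : j = i
      · subst hji
        have hni : j ∉ ii := by simpa using hc
        by_cases hjr : j ∈ rest
        · simp [hjr, hni, pv_discard_idem]
        · simp [hjr, hni]
      · by_cases hjr : j ∈ rest <;> simp [List.mem_cons, hji, hjr]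

theorem pv_aafold_tag (ings ii : List String) :
    ∀ (aa : List String) (g : String → PySem.Set String),
      (aa.foldl
        (fun x a =>
          ings.foldl
            (fun x i => if ii.contains i then x else x.modify i PySem.Set.empty (fun s => s.discard a))
            x)
        (pvTag (PySem.Set.ofList ings) g))
      = pvTag (PySem.Set.ofList ings)
          (fun i => if ii.contains i then g i
                    else aa.foldl (fun s a => PySem.Set.discard s a) (g i)) := by
  intro aa
  induction aa with
  | nil =>
    intro g
    rw [List.foldl_nil]
    apply pvTag_congr
    intro j _
    by_cases h : ii.contains j <;> simp
  | cons a rest ih =>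
    intro g
    rw [List.foldl_cons,
      pv_ingsfold_tag ii a ings (PySem.Set.ofList ings) g
        (fun j hj => (PySem.Set.mem_ofList _ _).mpr hj),
      ih]
    apply pvTag_congr
    intro j hj
    have hjm : j ∈ ings := (PySem.Set.mem_ofList _ _).mp hj
    by_cases h : j ∈ ii
    · simp [h]
    · simp [h, hjm, List.foldl_cons]

theorem pv_foldl_discard (aa : List String) :
    ∀ (s : List String),
      aa.foldl (fun s a => PySem.Set.discard s a) s = s.filter (fun y => !aa.contains y) := by
  induction aa with
  | nil => intro s; simp
  | cons a rest ih =>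
    intro s
    rw [List.foldl_cons, ih, PySem.Set.discard, List.filter_filter]
    apply List.filter_congr
    intro y _
    by_cases hya : y = a <;> by_cases hyr : y ∈ rest <;> simp [hya, hyr]

theorem pv_valA_filter (i : String) :
    ∀ (food : List (List String × List String)) (s : List String),
      food.foldl
        (fun s f => if f.1.contains i then s
                    else f.2.foldl (fun s a => PySem.Set.discard s a) s) s
      = s.filter (fun a => food.all (fun f => f.1.contains i || !f.2.contains a)) := by
  intro food
  induction food with
  | nil => intro s; simp
  | cons f rest ih =>
    intro s
    rw [List.foldl_cons]
    by_cases h : f.1.contains i = true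
    · rw [if_pos h, ih]
      have hi : i ∈ f.1 := by simpa using h
      apply List.filter_congr
      intro y _
      simp [List.all_cons, hi]
    · rw [if_neg h, pv_foldl_discard, ih, List.filter_filter]
      have hni : i ∉ f.1 := by simpa using h
      apply List.filter_congr
      intro y _
      simp [List.all_cons, hni, Bool.and_comm]

theorem pv_foldl_prod (food : List (List String × List String))
    (fx : PySem.Dict String (PySem.Set String) → (List String × List String) → PySem.Dict String (PySem.Set String))
    (fc : PySem.Dict String Int → (List String × List String) → PySem.Dict String Int) :
    ∀ (x : PySem.Dict String (PySem.Set String)) (c : PySem.Dict String Int),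
      food.foldl (fun st f => (fx st.1 f, fc st.2 f)) (x, c)
      = (food.foldl fx x, food.foldl fc c) := by
  induction food with
  | nil => intro x c; rfl
  | cons f rest ih => intro x c; rw [List.foldl_cons, List.foldl_cons, List.foldl_cons]; exact ih _ _

theorem pv_xA_tag (ings : List String) :
    ∀ (food : List (List String × List String)) (g : String → PySem.Set String),
      food.foldl
        (fun x f =>
          f.2.foldl
            (fun x a =>
              ings.foldl
                (fun x i => if f.1.contains i then x else x.modify i PySem.Set.empty (fun s => s.discard a))
                x)
            x)
        (pvTag (PySem.Set.ofList ings) g)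
      = pvTag (PySem.Set.ofList ings)
          (fun i => food.foldl
              (fun s f => if f.1.contains i then s
                          else f.2.foldl (fun s a => PySem.Set.discard s a) s) (g i)) := by
  intro food
  induction food with
  | nil => intro g; rfl
  | cons f rest ih =>
    intro g
    rw [List.foldl_cons, pv_aafold_tag ings f.1 f.2 g, ih]
    apply pvTag_congr
    intro j _
    rw [List.foldl_cons]

theorem pv_inter_self (s : PySem.Set String) : PySem.Set.inter s s = s := by
  simp only [PySem.Set.inter]
  apply List.filter_eq_self.mpr
  intro y hy
  simpa [PySem.Set.contains] using hy

theorem pv_inter_absorb (s si : PySem.Set String) :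
    PySem.Set.inter (PySem.Set.inter s si) si = PySem.Set.inter s si := by
  simp only [PySem.Set.inter, List.filter_filter]
  apply List.filter_congr
  intro y _
  by_cases h : y ∈ si <;> simp [PySem.Set.contains, h]

theorem pv_cand_aafold (si : PySem.Set String) :
    ∀ (aa : List String) (d : PySem.Dict String (PySem.Set String)) (a : String),
      (aa.foldl
        (fun cand a =>
          cand.insert a
            (match cand.get? a with
             | some s => PySem.Set.inter s si
             | none => si))
        d).get? a
      = if aa.contains a then
          some (match d.get? a with | some s => PySem.Set.inter s si | none => si)
        else d.get? a := by
  intro aa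
  induction aa with
  | nil => intro d a; simp
  | cons a1 rest ih =>
    intro d a
    rw [List.foldl_cons, ih]
    by_cases ha : a = a1
    · subst ha
      have h1 : (d.insert a (match d.get? a with | some s => PySem.Set.inter s si | none => si)).get? a
          = some (match d.get? a with | some s => PySem.Set.inter s si | none => si) :=
        PySem.Dict.get?_insert_self _ _ _
      by_cases hr : rest.contains a = true
      · rw [if_pos hr, if_pos (by simp), h1]
        cases hd : d.get? a <;> simp [pv_inter_self, pv_inter_absorb]
      · rw [if_neg hr, if_pos (by simp), h1]
    · have h2 : (d.insert a1 (match d.get? a1 with | some s => PySem.Set.inter s si | none => si)).get? a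
          = d.get? a := PySem.Dict.get?_insert_of_ne _ _ ha
      rw [h2]
      by_cases hr : rest.contains a = true
      · rw [if_pos hr, if_pos (by simp; exact Or.inr (by simpa using hr))]
      · rw [if_neg hr, if_neg (by simp [ha]; simpa using hr)]

def pvP (d : PySem.Dict String (PySem.Set String)) (a i : String) : Bool :=
  match d.get? a with
  | none => true
  | some s => s.contains i

theorem pv_cand_pred :
    ∀ (food : List (List String × List String)) (d : PySem.Dict String (PySem.Set String)) (a i : String),
      pvP (food.foldl
            (fun cand f =>
              f.2.foldl
                (fun cand a =>
                  cand.insert a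
                    (match cand.get? a with
                     | some s => PySem.Set.inter s (PySem.Set.ofList f.1)
                     | none => PySem.Set.ofList f.1))
                cand)
            d) a i
      = (pvP d a i && food.all (fun f => f.1.contains i || !f.2.contains a)) := by
  intro food
  induction food with
  | nil => intro d a i; simp
  | cons f rest ih =>
    intro d a i
    rw [List.foldl_cons, ih]
    have hstep : pvP (f.2.foldl
        (fun cand a =>
          cand.insert a
            (match cand.get? a with
             | some s => PySem.Set.inter s (PySem.Set.ofList f.1)
             | none => PySem.Set.ofList f.1))
        d) a i = (pvP d a i && (f.1.contains i || !f.2.contains a)) := by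
      unfold pvP
      rw [pv_cand_aafold (PySem.Set.ofList f.1) f.2 d a]
      by_cases hf : f.2.contains a = true
      · rw [if_pos hf, hf]
        cases hd : d.get? a with
        | none => simp
        | some s => simp
      · rw [if_neg hf]
        have : f.2.contains a = false := by simpa using hf
        rw [this]
        cases hd : d.get? a <;> simp
    rw [hstep, List.all_cons]
    cases pvP d a i <;> cases hcl : (f.1.contains i || !f.2.contains a) <;> simp

theorem pv_len_isEmpty (p : String × PySem.Set String) :
    (PySem.Set.len p.2 == 0) = p.2.isEmpty := by
  cases p.2 with
  | nil => simp [PySem.Set.len]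
  | cons b bs =>
    simp only [PySem.Set.len, List.isEmpty_cons, List.length_cons, beq_eq_false_iff_ne, ne_eq]
    omega

theorem pv_update_nil (l : List String) : PySem.Set.update [] l = PySem.Set.ofList l := rfl

theorem pv_main (food : List (List String × List String)) (ings : List String) (ales : List String) :
    (let x0 : PySem.Dict String (PySem.Set String) :=
      ings.foldl (fun d i => d.insert i (PySem.Set.ofList ales)) (PySem.Dict.mk [])
     let xc :=
      food.foldl
        (fun (st : PySem.Dict String (PySem.Set String) × PySem.Dict String Int) f =>
          (f.2.foldl
              (fun x a =>
                ings.foldl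
                  (fun x i =>
                    if f.1.contains i then x
                    else x.modify i PySem.Set.empty (fun s => s.discard a))
                  x)
              st.1,
           f.1.foldl (fun c i => c.modify i 0 (· + 1)) st.2))
        (x0, PySem.Dict.mk [])
     (((xc.1.items.filter (fun p => PySem.Set.len p.2 == 0)).map (fun p => xc.2.getD p.1 0)).sum,
      xc.1.items))
    =
    (let cand : PySem.Dict String (PySem.Set String) :=
      food.foldl
        (fun cand f =>
          let si := PySem.Set.ofList f.1
          f.2.foldl
            (fun cand a =>
              cand.insert a
                (match cand.get? a with
                 | some s => PySem.Set.inter s si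
                 | none => si))
            cand)
        (PySem.Dict.mk [])
     let c : PySem.Dict String Int :=
      food.foldl (fun c f => f.1.foldl (fun c i => c.insert i (c.getD i 0 + 1)) c) (PySem.Dict.mk [])
     let x : PySem.Dict String (PySem.Set String) :=
      ings.foldl
        (fun d i =>
          d.insert i
            ((PySem.Set.ofList ales).filter (fun a =>
              match cand.get? a with
              | none => true
              | some s => s.contains i)))
        (PySem.Dict.mk [])
     (((x.items.filter (fun p => p.2.isEmpty)).map (fun p => c.getD p.1 0)).sum, x.items)) := by
  simp only []
  rw [pv_foldl_prod food
    (fun x f =>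
      f.2.foldl
        (fun x a =>
          ings.foldl
            (fun x i =>
              if f.1.contains i then x
              else x.modify i PySem.Set.empty (fun s => s.discard a))
            x)
        x)
    (fun c f => f.1.foldl (fun c i => c.modify i 0 (· + 1)) c)]
  dsimp only
  -- the two x dicts are equal
  set cand := food.foldl
        (fun cand f =>
          f.2.foldl
            (fun cand a =>
              cand.insert a
                (match cand.get? a with
                 | some s => PySem.Set.inter s (PySem.Set.ofList f.1)
                 | none => PySem.Set.ofList f.1))
            cand)
        (PySem.Dict.mk []) with hcand
  have hx : food.foldl
        (fun x f =>
          f.2.foldl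
            (fun x a =>
              ings.foldl
                (fun x i =>
                  if f.1.contains i then x
                  else x.modify i PySem.Set.empty (fun s => s.discard a))
                x)
            x)
        (ings.foldl (fun d i => d.insert i (PySem.Set.ofList ales)) (PySem.Dict.mk []))
      = ings.foldl
        (fun d i =>
          d.insert i
            ((PySem.Set.ofList ales).filter (fun a =>
              match cand.get? a with
              | none => true
              | some s => s.contains i)))
        (PySem.Dict.mk []) := by
    have hA1 : ings.foldl (fun d i => d.insert i (PySem.Set.ofList ales)) (PySem.Dict.mk [])
        = pvTag (PySem.Set.ofList ings) (fun _ => PySem.Set.ofList ales) := by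
      rw [show (PySem.Dict.mk ([] : List (String × PySem.Set String)))
          = pvTag [] (fun _ => PySem.Set.ofList ales) from rfl,
        pv_foldl_insert_tag, pv_update_nil]
    have hB1 : ings.foldl
          (fun d i =>
            d.insert i
              ((PySem.Set.ofList ales).filter (fun a =>
                match cand.get? a with
                | none => true
                | some s => s.contains i)))
          (PySem.Dict.mk [])
        = pvTag (PySem.Set.ofList ings) (fun i => ((PySem.Set.ofList ales).filter (fun a =>
                match cand.get? a with
                | none => true
                | some s => s.contains i))) := by
      rw [show (PySem.Dict.mk ([] : List (String × PySem.Set String)))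
          = pvTag [] (fun i => ((PySem.Set.ofList ales).filter (fun a =>
                match cand.get? a with
                | none => true
                | some s => s.contains i))) from rfl,
        pv_foldl_insert_tag, pv_update_nil]
    rw [hA1, pv_xA_tag, hB1]
    apply pvTag_congr
    intro j _
    rw [pv_valA_filter]
    apply List.filter_congr
    intro a _
    have := pv_cand_pred food (PySem.Dict.mk []) a j
    rw [hcand]
    have hP : pvP (PySem.Dict.mk []) a j = true := rfl
    rw [hP, Bool.true_and] at this
    rw [← this]
    unfold pvP
    cases (food.foldl
        (fun cand f =>
          f.2.foldl
            (fun cand a =>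
              cand.insert a
                (match cand.get? a with
                 | some s => PySem.Set.inter s (PySem.Set.ofList f.1)
                 | none => PySem.Set.ofList f.1))
            cand)
        (PySem.Dict.mk [])).get? a <;> rfl
  rw [hx]
  have hfil : List.filter (fun (p : String × PySem.Set String) => PySem.Set.len p.2 == 0)
        (List.foldl
          (fun d i =>
            d.insert i
              (List.filter
                (fun a =>
                  match cand.get? a with
                  | none => true
                  | some s => s.contains i)
                (PySem.Set.ofList ales)))
          (PySem.Dict.mk []) ings).items
      = List.filter (fun p => p.2.isEmpty)
        (List.foldl
          (fun d i =>
            d.insert i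
              (List.filter
                (fun a =>
                  match cand.get? a with
                  | none => true
                  | some s => s.contains i)
                (PySem.Set.ofList ales)))
          (PySem.Dict.mk []) ings).items :=
    List.filter_congr (fun p _ => pv_len_isEmpty p)
  rw [hfil]
  rfl

-- ===== VERDICT (by name: the statement is the Claim_ definition above) =====
theorem pzl1_spec : Claim_equal_pzl1 := by
  intro food ings ales _
  unfold Spec_pzl1
  exact pv_main food ings ales
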